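-- pv_equiv track=rewrite | github.com/alexcockburn1/AoC2024 | prob14.py | get_quadrant_scores
-- ===== SOURCE A (Python) =====
-- def get_quadrant_scores(aggregated_robots, col_num, row_num):
--     mid_row, mid_col = row_num // 2, col_num // 2
--     upper_left_total = sum([aggregated_robots[position] for position in aggregated_robots if
--                             position[0] < mid_row and position[1] < mid_col])
--     upper_right_total = sum([aggregated_robots[position] for position in aggregated_robots if
--                              position[0] < mid_row and position[1] > mid_col])
--     lower_left_total = sum([aggregated_robots[position] for position in aggregated_robots if
--                             position[0] > mid_row and position[1] < mid_col])
--     lower_right_total = sum([aggregated_robots[position] for position in aggregated_robots if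
--                              position[0] > mid_row and position[1] > mid_col])
--     return [lower_left_total, lower_right_total, upper_left_total, upper_right_total]
-- ===== SOURCE B (Python) =====
-- def get_quadrant_scores(aggregated_robots, col_num, row_num):
--     mid_row, mid_col = row_num // 2, col_num // 2
--     upper_left = upper_right = lower_left = lower_right = 0
--     for position, count in aggregated_robots.items():
--         row, col = position
--         if row < mid_row:
--             if col < mid_col:
--                 upper_left += count
--             elif col > mid_col:
--                 upper_right += count
--         elif row > mid_row:
--             if col < mid_col:
--                 lower_left += count
--             elif col > mid_col:
--                 lower_right += count
--     return [lower_left, lower_right, upper_left, upper_right]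
-- ===== Notes on version B (the rewrite author's own statement) =====
-- stated objective: faster
-- what changed: Replaces A's four separate comprehension scans over the dict (each re-looking-up every key) with a single pass over items() that classifies each position into one of four accumulators with chained strict comparisons.
import Mathlib
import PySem

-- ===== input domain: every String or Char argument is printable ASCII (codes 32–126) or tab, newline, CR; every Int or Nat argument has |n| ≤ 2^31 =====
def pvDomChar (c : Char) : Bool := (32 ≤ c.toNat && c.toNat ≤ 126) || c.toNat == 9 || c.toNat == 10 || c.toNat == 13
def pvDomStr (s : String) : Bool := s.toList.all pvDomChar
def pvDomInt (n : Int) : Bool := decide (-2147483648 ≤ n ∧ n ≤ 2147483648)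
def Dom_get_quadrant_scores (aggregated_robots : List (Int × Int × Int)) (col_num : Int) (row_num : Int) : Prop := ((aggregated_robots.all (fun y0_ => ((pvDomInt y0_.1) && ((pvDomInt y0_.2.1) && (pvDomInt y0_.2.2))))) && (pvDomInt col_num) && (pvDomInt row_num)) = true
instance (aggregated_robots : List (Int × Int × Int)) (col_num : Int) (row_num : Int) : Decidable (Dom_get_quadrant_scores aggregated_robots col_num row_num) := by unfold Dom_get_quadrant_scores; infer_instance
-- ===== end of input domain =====

-- B replaces A's four separate comprehension scans over the dict with one classifying pass
-- over its items (objective: faster by a constant factor — one pass, no per-key lookups).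
-- The dict argument arrives as an assoc list of (row, col, count); both ports first rebuild
-- the Python-dict view of it with PySem.Dict.ofList (insertion order, later duplicates overwrite).

-- ===== PORT A =====
def get_quadrant_scores (aggregated_robots : List (Int × Int × Int)) (col_num : Int) (row_num : Int) : List Int :=
  let d : PySem.Dict (Int × Int) Int :=
    PySem.Dict.ofList (aggregated_robots.map (fun t => ((t.1, t.2.1), t.2.2)))
  let mid_row := PySem.Int.floordiv row_num 2
  let mid_col := PySem.Int.floordiv col_num 2
  let upper_left_total :=
    ((d.keys.filter (fun p => decide (p.1 < mid_row) && decide (p.2 < mid_col))).map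
      (fun p => d.getD p 0)).sum
  let upper_right_total :=
    ((d.keys.filter (fun p => decide (p.1 < mid_row) && decide (p.2 > mid_col))).map
      (fun p => d.getD p 0)).sum
  let lower_left_total :=
    ((d.keys.filter (fun p => decide (p.1 > mid_row) && decide (p.2 < mid_col))).map
      (fun p => d.getD p 0)).sum
  let lower_right_total :=
    ((d.keys.filter (fun p => decide (p.1 > mid_row) && decide (p.2 > mid_col))).map
      (fun p => d.getD p 0)).sum
  [lower_left_total, lower_right_total, upper_left_total, upper_right_total]

-- ===== PORT B =====
def pvQuadStep (mid_row mid_col : Int) (acc : Int × Int × Int × Int) (kv : (Int × Int) × Int) :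
    Int × Int × Int × Int :=
  if kv.1.1 < mid_row then
    if kv.1.2 < mid_col then (acc.1 + kv.2, acc.2.1, acc.2.2.1, acc.2.2.2)
    else if kv.1.2 > mid_col then (acc.1, acc.2.1 + kv.2, acc.2.2.1, acc.2.2.2)
    else acc
  else if kv.1.1 > mid_row then
    if kv.1.2 < mid_col then (acc.1, acc.2.1, acc.2.2.1 + kv.2, acc.2.2.2)
    else if kv.1.2 > mid_col then (acc.1, acc.2.1, acc.2.2.1, acc.2.2.2 + kv.2)
    else acc
  else acc

def get_quadrant_scores_alt (aggregated_robots : List (Int × Int × Int)) (col_num : Int) (row_num : Int) : List Int :=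
  let d : PySem.Dict (Int × Int) Int :=
    PySem.Dict.ofList (aggregated_robots.map (fun t => ((t.1, t.2.1), t.2.2)))
  let mid_row := PySem.Int.floordiv row_num 2
  let mid_col := PySem.Int.floordiv col_num 2
  let acc := d.items.foldl (pvQuadStep mid_row mid_col) (0, 0, 0, 0)
  [acc.2.2.1, acc.2.2.2, acc.1, acc.2.1]

-- ===== PRECONDITION & SPEC =====
def Spec_get_quadrant_scores (aggregated_robots : List (Int × Int × Int)) (col_num : Int) (row_num : Int) (out : List Int) : Prop := out = get_quadrant_scores_alt aggregated_robots col_num row_num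
instance (aggregated_robots : List (Int × Int × Int)) (col_num : Int) (row_num : Int) (out : List Int) : Decidable (Spec_get_quadrant_scores aggregated_robots col_num row_num out) := by unfold Spec_get_quadrant_scores; infer_instance

-- ===== CLAIM (what is proved, stated in full; the proofs are below) =====
def Claim_equal_get_quadrant_scores : Prop := ∀ (aggregated_robots : List (Int × Int × Int)) (col_num : Int) (row_num : Int), Dom_get_quadrant_scores aggregated_robots col_num row_num → Spec_get_quadrant_scores aggregated_robots col_num row_num (get_quadrant_scores aggregated_robots col_num row_num)

-- ===== LEMMAS AND PROOFS =====

-- quadrant sum over a list of ((row, col), count) items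
-- quadrant sum over a list of ((row, col), count) items
def pvQuadSum (mid_row mid_col : Int) (pr pc : Int → Int → Bool) (l : List ((Int × Int) × Int)) : Int :=
  ((l.filter (fun kv => pr kv.1.1 mid_row && pc kv.1.2 mid_col)).map (fun kv => kv.2)).sum

lemma pvQuadSum_cons (mid_row mid_col : Int) (pr pc : Int → Int → Bool)
    (kv : (Int × Int) × Int) (rest : List ((Int × Int) × Int)) :
    pvQuadSum mid_row mid_col pr pc (kv :: rest) =
      (if pr kv.1.1 mid_row && pc kv.1.2 mid_col then kv.2 else 0) +
        pvQuadSum mid_row mid_col pr pc rest := by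
  simp only [pvQuadSum, List.filter_cons]
  split <;> simp

lemma pvQuadFold (mid_row mid_col : Int) (l : List ((Int × Int) × Int)) (a b c e : Int) :
    l.foldl (pvQuadStep mid_row mid_col) (a, b, c, e) =
      (a + pvQuadSum mid_row mid_col (· < ·) (· < ·) l,
       b + pvQuadSum mid_row mid_col (· < ·) (· > ·) l,
       c + pvQuadSum mid_row mid_col (· > ·) (· < ·) l,
       e + pvQuadSum mid_row mid_col (· > ·) (· > ·) l) := by
  induction l generalizing a b c e with
  | nil => simp [pvQuadSum]
  | cons kv rest ih =>
    simp only [List.foldl_cons, pvQuadStep]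
    split_ifs with h1 h2 h3 h4 h5 h6
    · simp [ih, pvQuadSum_cons, add_assoc, h1, h2, lt_asymm h1, lt_asymm h2]
    · simp [ih, pvQuadSum_cons, add_assoc, h1, h2, h3, lt_asymm h1]
    · simp [ih, pvQuadSum_cons, h1, h2, h3, lt_asymm h1]
    · simp [ih, pvQuadSum_cons, add_assoc, h1, h4, h5, lt_asymm h5]
    · simp [ih, pvQuadSum_cons, add_assoc, h1, h4, h5, h6]
    · simp [ih, pvQuadSum_cons, h1, h4, h5, h6]
    · simp [ih, pvQuadSum_cons, h1, h4]

lemma pvFilterKeysSum (d : PySem.Dict (Int × Int) Int) (hnd : d.keys.Nodup)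
    (p : Int × Int → Bool) :
    ((d.keys.filter p).map (fun k => d.getD k 0)).sum =
      ((d.items.filter (fun kv => p kv.1)).map (fun kv => kv.2)).sum := by
  rw [PySem.Dict.items_eq_map_keys d hnd 0, List.filter_map, List.map_map]
  rfl

-- ===== VERDICT (by name: the statement is the Claim_ definition above) =====
theorem get_quadrant_scores_spec : Claim_equal_get_quadrant_scores := by
  intro ar col_num row_num _
  show _ = _
  unfold get_quadrant_scores get_quadrant_scores_alt
  simp only [pvQuadFold, zero_add]
  have hnd : (PySem.Dict.ofList (ar.map (fun t => ((t.1, t.2.1), t.2.2)))).keys.Nodup :=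
    PySem.Dict.nodup_keys_ofList _
  rw [pvFilterKeysSum _ hnd, pvFilterKeysSum _ hnd, pvFilterKeysSum _ hnd, pvFilterKeysSum _ hnd]
  rfl
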